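-- pv_equiv track=rewrite | github.com/D1kr4l/AD5934 | working_code2-R3.py | remove_nan_ovf
-- ===== SOURCE A (Python) =====
-- def remove_nan_ovf(array):
--     i = 0
--     while i < len(array):
--         if array[i] == "ovf" or array[i] == "nan":
--             del array[i]
--         else:
--             i += 1
--
--     return array
-- ===== SOURCE B (Python) =====
-- def remove_nan_ovf(array):
--     w = 0
--     for x in array:
--         if x != "ovf" and x != "nan":
--             array[w] = x
--             w += 1
--     del array[w:]
--     return array
-- ===== Notes on version B (the rewrite author's own statement) =====
-- stated objective: faster
-- what changed: Replaced the repeated del-at-index scan with a single two-pointer compaction pass (write index + tail truncation).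
import Mathlib
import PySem

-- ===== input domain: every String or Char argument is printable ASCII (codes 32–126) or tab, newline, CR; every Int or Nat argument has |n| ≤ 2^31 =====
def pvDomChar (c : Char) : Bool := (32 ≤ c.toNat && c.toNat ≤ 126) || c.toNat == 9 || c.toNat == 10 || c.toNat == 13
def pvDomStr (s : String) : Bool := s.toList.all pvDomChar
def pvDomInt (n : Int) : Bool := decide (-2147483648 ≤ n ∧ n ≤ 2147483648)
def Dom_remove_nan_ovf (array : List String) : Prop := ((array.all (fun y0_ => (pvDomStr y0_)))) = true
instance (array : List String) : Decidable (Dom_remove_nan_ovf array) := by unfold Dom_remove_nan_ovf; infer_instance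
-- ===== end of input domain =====

-- B replaces A's quadratic scan-and-delete with a single two-pointer compaction pass (faster); equivalence is about the return value (both mutate the list in place in Python).


-- ===== PORT A =====
-- A: while i < len(array): if array[i] in ("ovf","nan"): del array[i] else: i += 1
def removeLoopA (array : List String) (i : Nat) : List String :=
  if h : i < array.length then
    if array[i] = "ovf" ∨ array[i] = "nan" then
      removeLoopA (array.eraseIdx i) i
    else
      removeLoopA array (i + 1)
  else array
termination_by array.length - i
decreasing_by
  · have hl := List.length_eraseIdx (l := array) (i := i)
    rw [if_pos h] at hl
    omega
  · omega

def remove_nan_ovf (array : List String) : List String := removeLoopA array 0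

-- ===== PORT B =====
-- B: write-pointer compaction; the returned list is the compacted prefix (kept elements in order).
def remove_nan_ovf_alt (array : List String) : List String :=
  array.foldl (fun kept x => if x ≠ "ovf" ∧ x ≠ "nan" then kept ++ [x] else kept) []

-- ===== PRECONDITION & SPEC =====
def Spec_remove_nan_ovf (array : List String) (out : List String) : Prop := out = remove_nan_ovf_alt array
instance (array : List String) (out : List String) : Decidable (Spec_remove_nan_ovf array out) := by unfold Spec_remove_nan_ovf; infer_instance

-- ===== CLAIM (what is proved, stated in full; the proofs are below) =====
def Claim_equal_remove_nan_ovf : Prop := ∀ (array : List String), Dom_remove_nan_ovf array → Spec_remove_nan_ovf array (remove_nan_ovf array)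

-- ===== LEMMAS AND PROOFS =====

def pvKeep (x : String) : Bool := !(x = "ovf" ∨ x = "nan")

-- Invariant of A's while loop: the first i elements stay, the rest get filtered.
theorem removeLoopA_eq_filter (array : List String) (i : Nat) :
    removeLoopA array i = array.take i ++ (array.drop i).filter pvKeep := by
  rw [removeLoopA]
  split
  · rename_i h
    have hdrop : array.drop i = array[i] :: array.drop (i + 1) :=
      List.drop_eq_getElem_cons h
    split
    · rename_i hbad
      have := removeLoopA_eq_filter (array.eraseIdx i) i
      rw [this, List.eraseIdx_eq_take_drop_succ,
          List.take_append_of_le_length (by simp; omega),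
          List.take_take, min_self,
          List.drop_append_of_le_length (by simp; omega),
          List.drop_take]
      have hk : pvKeep array[i] = false := by simp [pvKeep, hbad]
      rw [show List.drop i array = array[i] :: List.drop (i+1) array from hdrop, List.filter_cons, hk]
      simp
    · rename_i hgood
      have := removeLoopA_eq_filter array (i + 1)
      have hk : pvKeep array[i] = true := by
        simp only [pvKeep, Bool.not_eq_true']
        simpa using hgood
      have htake : array.take (i + 1) = array.take i ++ [array[i]] := by
        rw [List.take_add_one, List.getElem?_eq_getElem h]
        rfl
      rw [this, htake, hdrop, List.filter_cons, hk, List.append_assoc]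
      rfl
  · rename_i h
    rw [List.take_of_length_le (by omega), List.drop_of_length_le (by omega)]
    simp
termination_by array.length - i
decreasing_by
  all_goals
    have h' : i < array.length := by omega
    have hl := List.length_eraseIdx (l := array) (i := i)
    rw [if_pos h'] at hl
    omega

-- B's foldl accumulates exactly the filtered list.
theorem foldB_eq_filter (array : List String) (acc : List String) :
    array.foldl (fun kept x => if x ≠ "ovf" ∧ x ≠ "nan" then kept ++ [x] else kept) acc
      = acc ++ array.filter pvKeep := by
  induction array generalizing acc with
  | nil => simp
  | cons x xs ih =>
    simp only [List.foldl_cons, List.filter_cons]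
    by_cases hx : x ≠ "ovf" ∧ x ≠ "nan"
    · have : pvKeep x = true := by
        simp only [pvKeep, Bool.not_eq_true']
        simp [hx.1, hx.2]
      simp [hx, this, ih]
    · have : pvKeep x = false := by
        simp only [pvKeep]
        rcases not_and_or.mp hx with h | h <;> simp [not_not.mp h]
      simp [hx, this, ih]

-- ===== VERDICT (by name: the statement is the Claim_ definition above) =====
theorem remove_nan_ovf_spec : Claim_equal_remove_nan_ovf := by
  intro array _
  show remove_nan_ovf array = remove_nan_ovf_alt array
  rw [remove_nan_ovf, remove_nan_ovf_alt, removeLoopA_eq_filter, foldB_eq_filter]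
  simp
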